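-- pv_equiv track=rewrite | github.com/TL-System/plato | plato/algorithms/fedavg.py | extract_module_names
-- ===== SOURCE A (Python) =====
-- import string
-- from typing import List
--
-- def extract_module_names(parameter_names: List[str]):
--     """
--     Extract module names from the given parameter names. A parameter name is a list of names
--     connected by `.`, such as `encoder.conv1.weight`.
--     """
--     split_char = "."
--
--     # Converting `encoder.conv1.weight`` to [encoder, conv1, weight]
--     translator = str.maketrans("", "", string.punctuation)
--     splitted_names = [
--         [
--             subname.translate(translator).lower()
--             for subname in name.split(split_char)
--         ]
--         for name in parameter_names
--     ]
--
--     # With [encoder, conv1, weight], [encoder, conv1, bias], diff_idx = 1.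
--     diff_idx = 0
--     for idx, subnames in enumerate(zip(*splitted_names)):
--         if len(set(subnames)) > 1:
--             diff_idx = idx
--             break
--
--     # Extract the first `diff_idx` parameter names as module names
--     extracted_names = []
--     for para_name in parameter_names:
--         splitted_names = para_name.split(split_char)
--         core_names = splitted_names[: diff_idx + 1]
--         module_name = f"{split_char}".join(core_names)
--         if module_name not in extracted_names:
--             extracted_names.append(module_name)
--
--     return extracted_names
-- ===== SOURCE B (Python) =====
-- import string
--
-- def extract_module_names(parameter_names):
--     """Row-wise divergence scan: compare each normalized name against the first
--     one and keep the minimum index of the earliest difference, instead of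
--     transposing with zip and scanning columns."""
--     translator = str.maketrans("", "", string.punctuation)
--     norm = [
--         [part.translate(translator).lower() for part in name.split(".")]
--         for name in parameter_names
--     ]
--
--     diff_idx = 0
--     if norm:
--         ref = norm[0]
--         m = min(len(row) for row in norm)
--         best = m
--         for row in norm[1:]:
--             j = 0
--             while j < best and row[j] == ref[j]:
--                 j += 1
--             if j < best:
--                 best = j
--         if best < m:
--             diff_idx = best
--
--     seen = {}
--     for name in parameter_names:
--         seen.setdefault(".".join(name.split(".")[: diff_idx + 1]), None)
--     return list(seen)
-- ===== Notes on version B (the rewrite author's own statement) =====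
-- stated objective: faster
-- what changed: Replaces A's zip-transpose of the normalized names and column-by-column set-cardinality scan with a row-wise scan that compares each normalized name against the first one keeping the minimum divergence index (capped by the running best), and replaces A's quadratic membership-list dedup with a linear ordered dict dedup.
import Mathlib
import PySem

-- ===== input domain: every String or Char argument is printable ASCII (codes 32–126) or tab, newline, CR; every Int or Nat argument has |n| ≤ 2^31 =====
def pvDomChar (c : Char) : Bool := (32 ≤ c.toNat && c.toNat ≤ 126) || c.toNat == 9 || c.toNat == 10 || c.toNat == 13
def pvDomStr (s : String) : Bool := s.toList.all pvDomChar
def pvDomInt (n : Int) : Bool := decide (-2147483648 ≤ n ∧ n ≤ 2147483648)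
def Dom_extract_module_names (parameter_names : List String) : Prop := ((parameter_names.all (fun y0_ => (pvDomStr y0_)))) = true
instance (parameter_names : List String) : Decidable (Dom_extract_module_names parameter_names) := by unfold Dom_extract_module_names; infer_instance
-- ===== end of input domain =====

-- B replaces A's zip-transpose-and-column-scan by a row-wise minimum-divergence scan and
-- A's quadratic membership-list dedup by a linear ordered dict-style dedup (measured faster).

-- ===== PORT A =====
-- string.punctuation
def pvPunct : List Char := "!\"#$%&'()*+,-./:;<=>?@[\\]^_`{|}~".toList

-- subname.translate(str.maketrans("", "", string.punctuation)).lower()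
-- (translate with that table deletes exactly the 32 ASCII punctuation chars; exact)
def pvNorm (s : String) : String :=
  PySem.Str.lower (String.ofList (s.toList.filter (fun c => !(pvPunct.contains c))))

-- name.split(".")  (sep ≠ "" so split? is always some)
def pvSplit (s : String) : List String := (PySem.Str.split? s ".").getD []

-- zip(*rows): one tuple per index below the shortest row (no tuples when rows = [])
def pvColumns (rows : List (List String)) : List (List String) :=
  (List.range (((rows.map List.length).min?).getD 0)).map
    (fun j => rows.map (fun r => r.getD j ""))

-- `for idx, subnames in enumerate(zip(*splitted_names)): if len(set(subnames)) > 1: diff_idx = idx; break`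
def pvDiffIdxLoop : List (List String) → Nat → Nat
  | [], _ => 0
  | col :: rest, idx =>
      if 1 < PySem.Set.len (PySem.Set.ofList col) then idx else pvDiffIdxLoop rest (idx + 1)

def extract_module_names (parameter_names : List String) : List String :=
  let splitted_names := parameter_names.map (fun name => (pvSplit name).map pvNorm)
  let diff_idx := pvDiffIdxLoop (pvColumns splitted_names) 0
  parameter_names.foldl
    (fun extracted para_name =>
      let module_name := PySem.Str.join "." ((pvSplit para_name).take (diff_idx + 1))
      if extracted.contains module_name then extracted else extracted ++ [module_name])
    []

-- ===== PORT B =====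
-- `j = 0; while j < best and row[j] == ref[j]: j += 1`
def pvScan (row ref : List String) (best : Nat) (j : Nat) : Nat :=
  if j < best then
    (if row.getD j "" = ref.getD j "" then pvScan row ref best (j + 1) else j)
  else j
termination_by best - j
decreasing_by omega

-- `for row in norm[1:]: j = scan...; if j < best: best = j`
def pvBest (ref : List String) (rows : List (List String)) (best : Nat) : Nat :=
  rows.foldl (fun b row => let j := pvScan row ref b 0; if j < b then j else b) best

def extract_module_names_alt (parameter_names : List String) : List String :=
  let norm := parameter_names.map (fun name => (pvSplit name).map pvNorm)
  let diff_idx :=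
    match norm with
    | [] => 0
    | ref :: rest =>
        let m := ((norm.map List.length).min?).getD 0   -- min(len(row) for row in norm)
        let best := pvBest ref rest m
        if best < m then best else 0
  PySem.List.dedup
    (parameter_names.map (fun name => PySem.Str.join "." ((pvSplit name).take (diff_idx + 1))))

-- ===== PRECONDITION & SPEC =====
def Spec_extract_module_names (parameter_names : List String) (out : List String) : Prop := out = extract_module_names_alt parameter_names
instance (parameter_names : List String) (out : List String) : Decidable (Spec_extract_module_names parameter_names out) := by unfold Spec_extract_module_names; infer_instance

-- ===== CLAIM (what is proved, stated in full; the proofs are below) =====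
def Claim_equal_extract_module_names : Prop := ∀ (parameter_names : List String), Dom_extract_module_names parameter_names → Spec_extract_module_names parameter_names (extract_module_names parameter_names)

-- ===== LEMMAS AND PROOFS =====

-- len(set(a :: l)) > 1 iff some element of l differs from the head a
lemma pvSetLen_gt_one (a : String) (l : List String) :
    (1 < PySem.Set.len (PySem.Set.ofList (a :: l))) ↔ ∃ x ∈ l, x ≠ a := by
  constructor
  · intro h
    by_contra hc
    have hc' : ∀ x ∈ l, x = a := fun x hx => by
      by_contra hne
      exact hc ⟨x, hx, hne⟩
    have hall : ∀ b ∈ PySem.Set.ofList (a :: l), b = a := by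
      intro b hb
      rcases List.mem_cons.1 ((PySem.Set.mem_ofList (a :: l) b).1 hb) with h0 | h0
      · exact h0
      · exact hc' b h0
    have hrep := List.eq_replicate_of_mem hall
    have hnd := PySem.Set.nodup_ofList (a :: l)
    rw [hrep] at hnd
    have hle : (PySem.Set.ofList (a :: l)).length ≤ 1 := List.nodup_replicate.mp hnd
    simp [PySem.Set.len] at h
    omega
  · rintro ⟨x, hx, hne⟩
    have hxs : x ∈ PySem.Set.ofList (a :: l) := (PySem.Set.mem_ofList _ _).2 (by simp [hx])
    have has : a ∈ PySem.Set.ofList (a :: l) := (PySem.Set.mem_ofList _ _).2 (by simp)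
    have hsub : ({x, a} : Finset String) ⊆ (PySem.Set.ofList (a :: l)).toFinset := by
      intro y hy
      simp at hy
      rcases hy with rfl | rfl
      · exact List.mem_toFinset.2 hxs
      · exact List.mem_toFinset.2 has
    have hcard : ({x, a} : Finset String).card = 2 := Finset.card_pair hne
    have h2 : 2 ≤ (PySem.Set.ofList (a :: l)).toFinset.card := hcard ▸ Finset.card_le_card hsub
    have h3 := (PySem.Set.ofList (a :: l)).toFinset_card_le
    simp [PySem.Set.len]
    omega

-- A's loop returns 0 when no column triggers the break
lemma pvDiffIdxLoop_none (cols : List (List String)) (i : Nat)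
    (h : ∀ c ∈ cols, ¬ 1 < PySem.Set.len (PySem.Set.ofList c)) :
    pvDiffIdxLoop cols i = 0 := by
  induction cols generalizing i with
  | nil => rfl
  | cons c rest ih =>
      rw [pvDiffIdxLoop]
      rw [if_neg (h c (by simp))]
      exact ih _ (fun c' hc' => h c' (by simp [hc']))

-- A's loop returns i + k for the first triggering column k
lemma pvDiffIdxLoop_some (cols : List (List String)) (i k : Nat)
    (hk : k < cols.length)
    (h1 : 1 < PySem.Set.len (PySem.Set.ofList (cols.getD k [])))
    (h2 : ∀ j, j < k → ¬ 1 < PySem.Set.len (PySem.Set.ofList (cols.getD j []))) :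
    pvDiffIdxLoop cols i = i + k := by
  induction cols generalizing i k with
  | nil => simp at hk
  | cons c rest ih =>
      rw [pvDiffIdxLoop]
      by_cases hc : 1 < PySem.Set.len (PySem.Set.ofList c)
      · rw [if_pos hc]
        rcases Nat.eq_zero_or_pos k with rfl | hpos
        · simp
        · exact absurd hc (by simpa using h2 0 hpos)
      · rw [if_neg hc]
        rcases Nat.eq_zero_or_pos k with rfl | hpos
        · exact absurd (by simpa using h1) hc
        · obtain ⟨k', rfl⟩ := Nat.exists_eq_add_of_lt hpos
          simp only [Nat.zero_add] at *
          have := ih (i + 1) k' (by simpa using hk)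
            (by simpa using h1)
            (fun j hj => by simpa using h2 (j + 1) (by omega))
          omega

-- the while-loop: first index in [j, best) where row and ref disagree, else ≥ best
lemma pvScan_spec (row ref : List String) (b : Nat) :
    ∀ n j, b - j ≤ n → j ≤ b →
      j ≤ pvScan row ref b j ∧ pvScan row ref b j ≤ b ∧
      (∀ k, j ≤ k → k < pvScan row ref b j → row.getD k "" = ref.getD k "") ∧
      (pvScan row ref b j < b → row.getD (pvScan row ref b j) "" ≠ ref.getD (pvScan row ref b j) "") := by
  intro n
  induction n with
  | zero =>
      intro j hn hj
      have hjb : j = b := by omega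
      rw [pvScan]
      subst hjb
      simp
      omega
  | succ n ih =>
      intro j hn hj
      rw [pvScan]
      by_cases hlt : j < b
      · rw [if_pos hlt]
        by_cases heq : row.getD j "" = ref.getD j ""
        · rw [if_pos heq]
          obtain ⟨ih1, ih2, ih3, ih4⟩ := ih (j + 1) (by omega) (by omega)
          refine ⟨by omega, ih2, ?_, ih4⟩
          intro k hk1 hk2
          rcases Nat.eq_or_lt_of_le hk1 with rfl | h
          · exact heq
          · exact ih3 k (by omega) hk2
        · rw [if_neg heq]
          exact ⟨le_refl _, by omega, fun k hk1 hk2 => by omega, fun _ => heq⟩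
      · rw [if_neg hlt]
        exact ⟨le_refl _, by omega, fun k hk1 hk2 => by omega, fun h => by omega⟩

-- the fold over the remaining rows: running minimum of earliest divergences
lemma pvBest_spec (ref : List String) (rows : List (List String)) :
    ∀ b, pvBest ref rows b ≤ b ∧
      (∀ row ∈ rows, ∀ k < pvBest ref rows b, row.getD k "" = ref.getD k "") ∧
      (pvBest ref rows b < b →
        ∃ row ∈ rows, row.getD (pvBest ref rows b) "" ≠ ref.getD (pvBest ref rows b) "") := by
  induction rows with
  | nil =>
      intro b
      refine ⟨by simp [pvBest], by simp, ?_⟩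
      intro h
      simp [pvBest] at h
  | cons row rest ih =>
      intro b
      obtain ⟨s1, s2, s3, s4⟩ := pvScan_spec row ref b b 0 (by omega) (by omega)
      set r0 := pvScan row ref b 0 with hr0
      have hstep : pvBest ref (row :: rest) b = pvBest ref rest (if r0 < b then r0 else b) := rfl
      set b' := if r0 < b then r0 else b with hb'
      have hb'r0 : b' = r0 := by
        rw [hb']
        split
        · rfl
        · omega
      have hb'le : b' ≤ b := by omega
      have hrowb' : ∀ k < b', row.getD k "" = ref.getD k "" := by
        intro k hk
        exact s3 k (by omega) (by omega)
      have hrowmis : b' < b → row.getD b' "" ≠ ref.getD b' "" := by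
        intro h
        rw [hb'r0]
        exact s4 (by omega)
      obtain ⟨i1, i2, i3⟩ := ih b'
      rw [hstep]
      refine ⟨le_trans i1 hb'le, ?_, ?_⟩
      · intro row' hrow' k hk
        rcases List.mem_cons.1 hrow' with rfl | h
        · exact hrowb' k (by omega)
        · exact i2 row' h k hk
      · intro hlt
        by_cases h : pvBest ref rest b' < b'
        · obtain ⟨row', h1, h2⟩ := i3 h
          exact ⟨row', by simp [h1], h2⟩
        · have : pvBest ref rest b' = b' := by omega
          refine ⟨row, by simp, ?_⟩
          rw [this] at hlt ⊢
          exact hrowmis hlt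
 
-- the two divergence indices coincide
lemma pvDiff_eq (ref : List String) (rest : List (List String)) :
    pvDiffIdxLoop (pvColumns (ref :: rest)) 0
      = (let m := ((((ref :: rest)).map List.length).min?).getD 0;
         if pvBest ref rest m < m then pvBest ref rest m else 0) := by
  set m := ((((ref :: rest)).map List.length).min?).getD 0 with hm
  obtain ⟨b1, b2, b3⟩ := pvBest_spec ref rest m
  set r := pvBest ref rest m with hr
  have hcols : pvColumns (ref :: rest)
      = (List.range m).map (fun j => (ref :: rest).map (fun row => row.getD j "")) := by
    rw [pvColumns]
  have hget : ∀ k, k < m →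
      (pvColumns (ref :: rest)).getD k []
        = ref.getD k "" :: rest.map (fun row => row.getD k "") := by
    intro k hk
    rw [hcols, List.getD_eq_getElem _ _ (by simpa using hk)]
    simp
  have hcond : ∀ k, k < m →
      ((1 < PySem.Set.len (PySem.Set.ofList ((pvColumns (ref :: rest)).getD k [])))
        ↔ ∃ row ∈ rest, row.getD k "" ≠ ref.getD k "") := by
    intro k hk
    rw [hget k hk, pvSetLen_gt_one]
    constructor
    · rintro ⟨x, hx, hne⟩
      obtain ⟨row, hrow, rfl⟩ := List.mem_map.1 hx
      exact ⟨row, hrow, hne⟩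
    · rintro ⟨row, hrow, hne⟩
      exact ⟨row.getD k "", List.mem_map.2 ⟨row, hrow, rfl⟩, hne⟩
  by_cases hlt : r < m
  · rw [if_pos hlt]
    have h := pvDiffIdxLoop_some (pvColumns (ref :: rest)) 0 r (by rw [hcols]; simpa using hlt)
      ((hcond r hlt).2 (b3 hlt))
      (fun j hj hcon => by
        obtain ⟨row, hrow, hne⟩ := (hcond j (by omega)).1 hcon
        exact hne (b2 row hrow j hj))
    simpa using h
  · rw [if_neg hlt]
    refine pvDiffIdxLoop_none _ 0 ?_
    intro c hc hcon
    obtain ⟨k, hk, rfl⟩ := List.mem_map.1 (hcols ▸ hc)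
    have hkm : k < m := by simpa using hk
    have : (pvColumns (ref :: rest)).getD k [] = (ref :: rest).map (fun row => row.getD k "") := by
      rw [hget k hkm]; simp
    rw [← this] at hcon
    obtain ⟨row, hrow, hne⟩ := (hcond k hkm).1 hcon
    have : r = m := by omega
    exact hne (b2 row hrow k (by omega))

-- A's membership-append fold is the ordered dedup of the mapped list
lemma pvFold_dedup (l : List String) (f : String → String) :
    l.foldl (fun acc x => if acc.contains (f x) then acc else acc ++ [f x]) []
      = PySem.List.dedup (l.map f) := by
  rw [PySem.List.dedup_eq_ofList, PySem.Set.ofList_eq_foldl, List.foldl_map]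
  rfl

-- ===== VERDICT (by name: the statement is the Claim_ definition above) =====
theorem extract_module_names_spec : Claim_equal_extract_module_names := by
  intro parameter_names _
  unfold Spec_extract_module_names extract_module_names extract_module_names_alt
  cases hp : parameter_names with
  | nil => simp [pvColumns, pvDiffIdxLoop, PySem.List.dedup, PySem.Set.ofList]
  | cons n0 ns =>
      simp only [List.map_cons]
      have hd := pvDiff_eq ((pvSplit n0).map pvNorm) (ns.map (fun name => (pvSplit name).map pvNorm))
      simp only [] at hd ⊢
      rw [hd]
      exact pvFold_dedup _ _
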